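-- pv_equiv track=rewrite | github.com/codewithEshaYoutube/Advent_of_Code_Competition | Day9/day9_part2.py | is_rectangle_valid
-- ===== SOURCE A (Python) =====
-- def is_rectangle_valid(x1, x2, y1, y2, valid_tiles):
--     """Check if all points in rectangle are valid"""
--     min_x, max_x = sorted([x1, x2])
--     min_y, max_y = sorted([y1, y2])
--
--     # Quick check: corners must be red
--     if (x1, y1) not in valid_tiles or (x2, y2) not in valid_tiles:
--         return False
--
--     # Check all points in rectangle
--     for x in range(min_x, max_x + 1):
--         for y in range(min_y, max_y + 1):
--             if (x, y) not in valid_tiles: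
--                 return False
--     return True
-- ===== SOURCE B (Python) =====
-- def is_rectangle_valid(x1, x2, y1, y2, valid_tiles):
--     """Check if all points in rectangle are valid"""
--     min_x, max_x = sorted([x1, x2])
--     min_y, max_y = sorted([y1, y2])
--     area = (max_x - min_x + 1) * (max_y - min_y + 1)
--     count = 0
--     for (tx, ty) in set(valid_tiles):
--         if min_x <= tx <= max_x and min_y <= ty <= max_y:
--             count += 1
--     return count == area
-- ===== Notes on version B (the rewrite author's own statement) =====
-- stated objective: faster
-- what changed: Instead of scanning every grid cell of the rectangle and testing list membership (O(area*n)), B computes the rectangle's area once and makes a single pass over the deduplicated tile set counting tiles inside the box, returning count == area; the corner check disappears since corners lie inside the box.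
import Mathlib
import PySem

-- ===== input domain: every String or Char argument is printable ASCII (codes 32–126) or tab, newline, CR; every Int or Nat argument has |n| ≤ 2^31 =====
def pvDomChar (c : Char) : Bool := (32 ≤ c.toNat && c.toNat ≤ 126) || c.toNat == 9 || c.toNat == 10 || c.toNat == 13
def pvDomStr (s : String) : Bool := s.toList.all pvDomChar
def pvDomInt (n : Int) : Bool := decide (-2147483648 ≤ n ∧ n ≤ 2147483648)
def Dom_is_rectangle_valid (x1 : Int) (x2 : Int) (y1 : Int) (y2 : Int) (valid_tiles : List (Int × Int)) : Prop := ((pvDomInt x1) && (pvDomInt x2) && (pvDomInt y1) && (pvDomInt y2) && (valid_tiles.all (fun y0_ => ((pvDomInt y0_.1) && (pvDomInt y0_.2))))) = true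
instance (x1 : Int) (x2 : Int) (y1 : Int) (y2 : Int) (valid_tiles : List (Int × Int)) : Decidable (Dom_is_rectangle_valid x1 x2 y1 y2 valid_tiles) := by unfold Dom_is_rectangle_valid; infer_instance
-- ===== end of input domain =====

-- B replaces A's cell-by-cell scan of the whole rectangle by a single counting pass over the
-- deduplicated tile set, comparing the number of distinct in-box tiles with the rectangle's area.

-- ===== PORT A =====
-- sorted([x1, x2]) on a two-element list yields exactly (min, max)
def is_rectangle_valid (x1 : Int) (x2 : Int) (y1 : Int) (y2 : Int) (valid_tiles : List (Int × Int)) : Bool :=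
  let min_x := min x1 x2
  let max_x := max x1 x2
  let min_y := min y1 y2
  let max_y := max y1 y2
  if !(valid_tiles.contains (x1, y1)) || !(valid_tiles.contains (x2, y2)) then
    false
  else
    -- nested for-loops with early 'return False' = all cells pass
    (PySem.List.pyRange min_x (max_x + 1) 1).all (fun x =>
      (PySem.List.pyRange min_y (max_y + 1) 1).all (fun y =>
        valid_tiles.contains (x, y)))

-- ===== PORT B =====
def is_rectangle_valid_alt (x1 : Int) (x2 : Int) (y1 : Int) (y2 : Int) (valid_tiles : List (Int × Int)) : Bool :=
  let min_x := min x1 x2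
  let max_x := max x1 x2
  let min_y := min y1 y2
  let max_y := max y1 y2
  let area : Int := (max_x - min_x + 1) * (max_y - min_y + 1)
  let count : Int := (PySem.Set.ofList valid_tiles).foldl
    (fun acc t =>
      if min_x ≤ t.1 ∧ t.1 ≤ max_x ∧ min_y ≤ t.2 ∧ t.2 ≤ max_y then acc + 1 else acc)
    0
  count == area

-- ===== PRECONDITION & SPEC =====
def Spec_is_rectangle_valid (x1 : Int) (x2 : Int) (y1 : Int) (y2 : Int) (valid_tiles : List (Int × Int)) (out : Bool) : Prop := out = is_rectangle_valid_alt x1 x2 y1 y2 valid_tiles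
instance (x1 : Int) (x2 : Int) (y1 : Int) (y2 : Int) (valid_tiles : List (Int × Int)) (out : Bool) : Decidable (Spec_is_rectangle_valid x1 x2 y1 y2 valid_tiles out) := by unfold Spec_is_rectangle_valid; infer_instance

-- ===== CLAIM (what is proved, stated in full; the proofs are below) =====
def Claim_equal_is_rectangle_valid : Prop := ∀ (x1 : Int) (x2 : Int) (y1 : Int) (y2 : Int) (valid_tiles : List (Int × Int)), Dom_is_rectangle_valid x1 x2 y1 y2 valid_tiles → Spec_is_rectangle_valid x1 x2 y1 y2 valid_tiles (is_rectangle_valid x1 x2 y1 y2 valid_tiles)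

-- ===== LEMMAS AND PROOFS =====

-- the list of all grid cells of the rectangle [a,A] × [b,B]
def pvGrid (a A b B : Int) : List (Int × Int) :=
  (PySem.List.pyRange a (A + 1) 1) ×ˢ (PySem.List.pyRange b (B + 1) 1)

theorem pvGrid_mem (a A b B : Int) (t : Int × Int) :
    t ∈ pvGrid a A b B ↔ (a ≤ t.1 ∧ t.1 ≤ A) ∧ (b ≤ t.2 ∧ t.2 ≤ B) := by
  obtain ⟨x, y⟩ := t
  simp [pvGrid, PySem.List.mem_pyRange_one]

theorem pvGrid_nodup (a A b B : Int) : (pvGrid a A b B).Nodup :=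
  List.Nodup.product (PySem.List.nodup_pyRange_one _ _) (PySem.List.nodup_pyRange_one _ _)

theorem pvGrid_length (a A b B : Int) (h1 : a ≤ A) (h2 : b ≤ B) :
    ((pvGrid a A b B).length : Int) = (A - a + 1) * (B - b + 1) := by
  simp [pvGrid, List.length_product, PySem.List.length_pyRange_one]
  rw [max_eq_left (by omega), max_eq_left (by omega)]
  ring

-- B's count of distinct in-box tiles equals the area iff every grid cell is a valid tile
theorem pv_count_eq_area_iff (mx Mx my My : Int) (h1 : mx ≤ Mx) (h2 : my ≤ My)
    (tiles : List (Int × Int)) :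
    (((PySem.Set.ofList tiles).countP
        (fun t => decide (mx ≤ t.1 ∧ t.1 ≤ Mx ∧ my ≤ t.2 ∧ t.2 ≤ My)) : Int)
      = (Mx - mx + 1) * (My - my + 1))
    ↔ (∀ t ∈ pvGrid mx Mx my My, t ∈ tiles) := by
  have hs : (PySem.Set.ofList tiles).Nodup := PySem.Set.nodup_ofList tiles
  set s := PySem.Set.ofList tiles with hsdef
  set G := pvGrid mx Mx my My with hG
  have hcount : (s.countP (fun t => decide (mx ≤ t.1 ∧ t.1 ≤ Mx ∧ my ≤ t.2 ∧ t.2 ≤ My)))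
      = (s.toFinset ∩ G.toFinset).card := by
    rw [List.countP_eq_length_filter,
      ← List.toFinset_card_of_nodup (hs.filter _), List.toFinset_filter]
    congr 1
    ext t
    simp only [Finset.mem_filter, Finset.mem_inter, List.mem_toFinset, decide_eq_true_eq, hG,
      pvGrid_mem]
    tauto
  have harea : ((Mx - mx + 1) * (My - my + 1)) = (G.toFinset.card : Int) := by
    rw [List.toFinset_card_of_nodup (pvGrid_nodup _ _ _ _), pvGrid_length _ _ _ _ h1 h2]
  rw [hcount, harea, Int.natCast_inj]
  constructor
  · intro h t ht
    have hsub : s.toFinset ∩ G.toFinset = G.toFinset :=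
      Finset.eq_of_subset_of_card_le Finset.inter_subset_right (le_of_eq h.symm)
    have := Finset.inter_eq_right.mp hsub
    have := this (List.mem_toFinset.mpr ht)
    rw [List.mem_toFinset] at this
    exact (PySem.Set.mem_ofList tiles t).mp this
  · intro h
    rw [Finset.inter_eq_right.mpr ?_]
    intro t ht
    rw [List.mem_toFinset] at *
    exact (PySem.Set.mem_ofList tiles t).mpr (h t ht)

theorem pv_main (x1 x2 y1 y2 : Int) (tiles : List (Int × Int)) :
    is_rectangle_valid x1 x2 y1 y2 tiles = is_rectangle_valid_alt x1 x2 y1 y2 tiles := by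
  apply Bool.coe_iff_coe.mp
  have hc1 : (x1, y1) ∈ pvGrid (min x1 x2) (max x1 x2) (min y1 y2) (max y1 y2) := by
    rw [pvGrid_mem]
    exact ⟨⟨min_le_left _ _, le_max_left _ _⟩, ⟨min_le_left _ _, le_max_left _ _⟩⟩
  have hc2 : (x2, y2) ∈ pvGrid (min x1 x2) (max x1 x2) (min y1 y2) (max y1 y2) := by
    rw [pvGrid_mem]
    exact ⟨⟨min_le_right _ _, le_max_right _ _⟩, ⟨min_le_right _ _, le_max_right _ _⟩⟩
  have hA : is_rectangle_valid x1 x2 y1 y2 tiles = true ↔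
      ∀ t ∈ pvGrid (min x1 x2) (max x1 x2) (min y1 y2) (max y1 y2), t ∈ tiles := by
    simp only [is_rectangle_valid, Bool.or_eq_true, Bool.not_eq_eq_eq_not, Bool.not_true,
      List.contains_eq_mem]
    constructor
    · intro h t ht
      split_ifs at h with hcond
      obtain ⟨x, y⟩ := t
      rw [pvGrid_mem] at ht
      simp only [List.all_eq_true] at h
      have := h x (by rw [PySem.List.mem_pyRange_one]; omega)
      have := this y (by rw [PySem.List.mem_pyRange_one]; omega)
      simpa using this
    · intro h
      rw [if_neg]
      · simp only [List.all_eq_true]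
        intro x hx y hy
        rw [PySem.List.mem_pyRange_one] at hx hy
        have := h (x, y) (by rw [pvGrid_mem]; simp; omega)
        simpa using this
      · simp [h _ hc1, h _ hc2]
  have hB : is_rectangle_valid_alt x1 x2 y1 y2 tiles = true ↔
      ∀ t ∈ pvGrid (min x1 x2) (max x1 x2) (min y1 y2) (max y1 y2), t ∈ tiles := by
    simp only [is_rectangle_valid_alt, PySem.List.foldl_ite_add_one, zero_add, beq_iff_eq]
    exact pv_count_eq_area_iff _ _ _ _ (min_le_max) (min_le_max) tiles
  rw [hA, hB]

-- ===== VERDICT (by name: the statement is the Claim_ definition above) =====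
theorem is_rectangle_valid_spec : Claim_equal_is_rectangle_valid := by
  intro x1 x2 y1 y2 valid_tiles _
  unfold Spec_is_rectangle_valid
  exact pv_main x1 x2 y1 y2 valid_tiles
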